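-- pv_equiv track=rewrite | github.com/ariellethijs/ArgMiner | pipeline/ASMO/majority/OptBaseline.py | extractNER
-- ===== SOURCE A (Python) =====
-- import string
--
-- def extractNER(sentence):
--     sentence = sentence.translate(str.maketrans("", "", string.punctuation))
--     sentence = sentence.split(" ")
--
--     indices = [i for i, x in enumerate(sentence) if x == "Lord" or x == "Lady" or x == "Baroness"]
--     names = []
--     for i in indices:
--         if i+1 < len(sentence):
--             name = sentence[i] + " " + sentence[i+1]
--             names.append(name.lower())
--     if names:
--         return names
--     else:
--         return None
-- ===== SOURCE B (Python) =====
-- import string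
--
-- def extractNER(sentence):
--     # One streaming pass over characters; never materializes the word list.
--     punct = set(string.punctuation)
--     names = []
--     prev = None          # the word before the one being built (None before the first boundary)
--     cur = []             # characters of the word currently being built
--     for ch in sentence:
--         if ch in punct:
--             continue     # punctuation is deleted, exactly like str.translate
--         if ch == " ":
--             word = "".join(cur)
--             if prev in ("Lord", "Lady", "Baroness"):
--                 names.append((prev + " " + word).lower())
--             prev = word
--             cur = []
--         else:
--             cur.append(ch)
--     word = "".join(cur)
--     if prev in ("Lord", "Lady", "Baroness"):
--         names.append((prev + " " + word).lower())
--     return names or None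
-- ===== Notes on version B (the rewrite author's own statement) =====
-- stated objective: alternative
-- what changed: A builds the punctuation-stripped word list with split, collects the integer indices of title words via an enumerate comprehension, then loops over those indices with a bounds check and two list indexings; B is a single streaming state machine over the raw characters that never builds a word list or indices: it deletes punctuation on the fly and maintains (previous word, current word), emitting a lowered pair at each word boundary that completes one.
import Mathlib
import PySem

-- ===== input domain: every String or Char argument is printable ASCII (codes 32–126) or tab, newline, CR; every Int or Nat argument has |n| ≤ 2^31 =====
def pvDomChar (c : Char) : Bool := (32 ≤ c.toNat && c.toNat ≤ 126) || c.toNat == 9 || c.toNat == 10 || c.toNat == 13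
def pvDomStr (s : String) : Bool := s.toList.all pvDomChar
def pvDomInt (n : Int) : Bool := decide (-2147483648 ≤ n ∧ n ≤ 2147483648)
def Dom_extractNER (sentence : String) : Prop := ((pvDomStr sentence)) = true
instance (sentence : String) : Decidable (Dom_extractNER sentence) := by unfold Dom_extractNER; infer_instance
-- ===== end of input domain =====

-- B replaces A's split-into-words + index comprehension + index loop by a single streaming
-- state machine over the raw characters that never builds a word list (objective: alternative).

-- string.punctuation (both Pythons delete exactly these characters)
def pvPunct : List Char := "!\"#$%&'()*+,-./:;<=>?@[\\]^_`{|}~".toList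

-- x == "Lord" or x == "Lady" or x == "Baroness" (B's 'prev in (...)' on a str is the same test)
def pvIsTitle (w : List Char) : Bool :=
  w == "Lord".toList || w == "Lady".toList || w == "Baroness".toList

-- (a + " " + b).lower()
def pvName (a b : List Char) : String := String.ofList (PySem.Chars.lower (a ++ ' ' :: b))

-- ===== PORT A =====
def extractNER (sentence : String) : Option (List String) :=
  let cleaned : List Char := sentence.toList.filter (fun c => !(pvPunct.contains c))
  let ws : List (List Char) := PySem.Chars.splitOn cleaned " ".toList
  let indices : List Int :=
    ((PySem.List.enumerate ws).filter (fun p => pvIsTitle p.2)).map (fun p => p.1)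
  let names : List String :=
    indices.foldl (fun acc i =>
      if decide (i + 1 < (ws.length : Int)) = true then
        acc ++ [pvName (PySem.List.pyGetD ws i []) (PySem.List.pyGetD ws (i + 1) [])]
      else acc) []
  if names = [] then none else some names

-- ===== PORT B =====
-- B's 'if prev in ("Lord","Lady","Baroness"): names.append((prev + " " + word).lower())'
-- (prev is None before the first word boundary, and 'None in (...)' is False)
def pvEmit (prev : Option (List Char)) (w : List Char) : List String :=
  match prev with
  | some p => if pvIsTitle p then [pvName p w] else []
  | none => []

def extractNER_alt (sentence : String) : Option (List String) :=
  let punct : PySem.Set Char := PySem.Set.ofList pvPunct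
  let st : List String × Option (List Char) × List Char :=
    sentence.toList.foldl
      (fun (s : List String × Option (List Char) × List Char) ch =>
        if punct.contains ch then s                         -- continue: punctuation deleted
        else if ch = ' ' then
          (s.1 ++ pvEmit s.2.1 s.2.2, some s.2.2, ([] : List Char))
        else (s.1, s.2.1, s.2.2 ++ [ch]))
      ([], none, [])
  let names : List String := st.1 ++ pvEmit st.2.1 st.2.2   -- the final word completes at end
  if names = [] then none else some names

-- ===== PRECONDITION & SPEC =====
def Spec_extractNER (sentence : String) (out : Option (List String)) : Prop := out = extractNER_alt sentence
instance (sentence : String) (out : Option (List String)) : Decidable (Spec_extractNER sentence out) := by unfold Spec_extractNER; infer_instance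

-- ===== CLAIM =====
def Claim_equal_extractNER : Prop := ∀ (sentence : String), Dom_extractNER sentence → Spec_extractNER sentence (extractNER sentence)

-- ===== LEMMAS AND PROOFS =====

-- single-char split, structurally recursive (proof-side model of PySem.Chars.splitOn · [' '])
def pvMySplit : List Char → List (List Char)
  | [] => [[]]
  | c :: cs =>
    if c = ' ' then [] :: pvMySplit cs
    else match pvMySplit cs with
      | [] => [[c]]
      | w :: r => (c :: w) :: r

def pvConsHead (p : List Char) : List (List Char) → List (List Char)
  | [] => [p]
  | w :: r => (p ++ w) :: r

-- emissions of a word sequence given the word preceding it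
def pvPairs : Option (List Char) → List (List Char) → List String
  | _, [] => []
  | prev, w :: r => pvEmit prev w ++ pvPairs (some w) r

-- the punctuation-free step of B's machine
def pvStep (s : List String × Option (List Char) × List Char) (ch : Char) :
    List String × Option (List Char) × List Char :=
  if ch = ' ' then (s.1 ++ pvEmit s.2.1 s.2.2, some s.2.2, ([] : List Char))
  else (s.1, s.2.1, s.2.2 ++ [ch])

theorem pvMySplit_ne_nil (cs : List Char) : pvMySplit cs ≠ [] := by
  cases cs with
  | nil => simp [pvMySplit]
  | cons c r =>
    unfold pvMySplit
    split_ifs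
    · simp
    · cases h : pvMySplit r <;> simp

theorem pvSplitOn_go_eq : ∀ (fuel : Nat) (l cur : List Char) (acc : List (List Char)),
    l.length < fuel →
    PySem.Chars.splitOn.go [' '] fuel l cur acc
      = acc.reverse ++ pvConsHead cur.reverse (pvMySplit l) := by
  intro fuel
  induction fuel with
  | zero => intro l cur acc h; omega
  | succ n ih =>
    intro l cur acc h
    cases l with
    | nil => simp [PySem.Chars.splitOn.go, pvMySplit, pvConsHead]
    | cons c rest =>
      by_cases hc : c = ' '
      · subst hc
        have : PySem.Chars.splitOn.go [' '] (n + 1) (' ' :: rest) cur acc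
            = PySem.Chars.splitOn.go [' '] n rest [] (cur.reverse :: acc) := by
          simp [PySem.Chars.splitOn.go, List.isPrefixOf]
        rw [this, ih rest [] (cur.reverse :: acc) (by simp at h; omega)]
        obtain ⟨w, r, hw⟩ := List.exists_cons_of_ne_nil (pvMySplit_ne_nil rest)
        simp [pvMySplit, hw, pvConsHead]
      · have : PySem.Chars.splitOn.go [' '] (n + 1) (c :: rest) cur acc
            = PySem.Chars.splitOn.go [' '] n rest (c :: cur) acc := by
          simp only [PySem.Chars.splitOn.go, List.isPrefixOf]
          rw [if_neg]
          simp only [Bool.and_eq_true, beq_iff_eq]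
          intro h'; exact hc h'.1.symm
        rw [this, ih rest (c :: cur) acc (by simp at h; omega)]
        obtain ⟨w, r, hw⟩ := List.exists_cons_of_ne_nil (pvMySplit_ne_nil rest)
        simp [pvMySplit, hc, hw, pvConsHead]

theorem pvSplitOn_eq (cs : List Char) : PySem.Chars.splitOn cs [' '] = pvMySplit cs := by
  unfold PySem.Chars.splitOn
  rw [pvSplitOn_go_eq (cs.length + 1) cs [] [] (by omega)]
  obtain ⟨w, r, hw⟩ := List.exists_cons_of_ne_nil (pvMySplit_ne_nil cs)
  simp [hw, pvConsHead]

theorem pvStep_space (s : List String × Option (List Char) × List Char) :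
    pvStep s ' ' = (s.1 ++ pvEmit s.2.1 s.2.2, some s.2.2, ([] : List Char)) := by
  simp [pvStep]

theorem pvStep_char (s : List String × Option (List Char) × List Char) (c : Char) (h : ¬ c = ' ') :
    pvStep s c = (s.1, s.2.1, s.2.2 ++ [c]) := by
  simp [pvStep, h]

-- B's machine, run over punctuation-free characters, produces the pair emissions of the words
theorem pvFold_eq : ∀ (cs : List Char) (acc : List String) (prev : Option (List Char)) (cur : List Char),
    (cs.foldl pvStep (acc, prev, cur)).1
        ++ pvEmit (cs.foldl pvStep (acc, prev, cur)).2.1 (cs.foldl pvStep (acc, prev, cur)).2.2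
      = acc ++ pvPairs prev (pvConsHead cur (pvMySplit cs)) := by
  intro cs
  induction cs with
  | nil => intro acc prev cur; simp [pvMySplit, pvConsHead, pvPairs]
  | cons c rest ih =>
    intro acc prev cur
    by_cases hc : c = ' '
    · subst hc
      rw [List.foldl_cons, pvStep_space, ih]
      obtain ⟨w, r, hw⟩ := List.exists_cons_of_ne_nil (pvMySplit_ne_nil rest)
      simp [pvMySplit, hw, pvConsHead, pvPairs]
    · rw [List.foldl_cons, pvStep_char _ _ hc, ih]
      obtain ⟨w, r, hw⟩ := List.exists_cons_of_ne_nil (pvMySplit_ne_nil rest)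
      simp [pvMySplit, hc, hw, pvConsHead, pvPairs]

theorem pvPairs_some (ws : List (List Char)) : ∀ (p : List Char),
    pvPairs (some p) ws
      = (((p :: ws).zip ws).filter (fun q => pvIsTitle q.1)).map (fun q => pvName q.1 q.2) := by
  induction ws with
  | nil => intro p; simp [pvPairs]
  | cons w r ih =>
    intro p
    simp only [pvPairs, pvEmit, List.zip_cons_cons, List.filter_cons]
    rw [ih w]
    by_cases h : pvIsTitle p = true
    · simp only [h, if_true, List.cons_append, List.nil_append, List.map_cons]
    · rw [if_neg h, if_neg h, List.nil_append]

theorem pvPairs_none (ws : List (List Char)) :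
    pvPairs none ws
      = ((ws.zip (ws.drop 1)).filter (fun q => pvIsTitle q.1)).map (fun q => pvName q.1 q.2) := by
  cases ws with
  | nil => simp [pvPairs]
  | cons w r => simp [pvPairs, pvEmit, pvPairs_some]

-- A's filtered-index pass over one list equals the pass over adjacent pairs.
theorem pv_key (full : List (List Char)) (ws : List (List Char)) (s : Nat)
    (h : full.drop s = ws) :
    List.map (fun i => pvName (PySem.List.pyGetD full i []) (PySem.List.pyGetD full (i + 1) []))
      (List.filter (fun i => decide (i + 1 < (full.length : Int)))
        (List.map (fun p => p.1)
          (List.filter (fun p => pvIsTitle p.2) (PySem.List.enumerate ws (s : Int)))))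
    = List.map (fun p => pvName p.1 p.2)
        (List.filter (fun p => pvIsTitle p.1) (ws.zip (ws.drop 1))) := by
  induction ws generalizing s with
  | nil => simp [PySem.List.enumerate]
  | cons a t ih =>
    have hlen : s < full.length := by
      have := congrArg List.length h
      simp [List.length_drop] at this
      omega
    have hdrop' : full.drop (s + 1) = t := by
      have := congrArg (List.drop 1) h
      rw [List.drop_drop] at this
      simpa [Nat.add_comm] using this
    have ha : PySem.List.pyGetD full ((s : Nat) : Int) [] = a := by
      have h0 := congrArg (fun l => l[0]?) h
      simp [List.getElem?_drop] at h0
      rw [PySem.List.pyGetD_natCast]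
      simp [List.getD_eq_getElem?_getD, h0]
    rw [PySem.List.enumerate_cons]
    cases hb : pvIsTitle a with
    | false =>
      have ih' := ih (s + 1) hdrop'
      push_cast at ih'
      simp only [List.filter_cons, hb, Bool.false_eq_true, if_false]
      rw [ih']
      cases t with
      | nil => simp
      | cons b t' => simp [hb]
    | true =>
      cases t with
      | nil =>
        have hlen2 : ((full.length : Nat) : Int) = (s : Int) + 1 := by
          have := congrArg List.length hdrop'
          simp [List.length_drop] at this
          have h2 : full.length = s + 1 := by omega
          exact_mod_cast h2
        simp [PySem.List.enumerate, hb, hlen2]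
      | cons b t' =>
        have hlen2 : s + 1 < full.length := by
          have := congrArg List.length hdrop'
          simp [List.length_drop] at this
          omega
        have hpred : decide ((s : Int) + 1 < (full.length : Int)) = true := by
          simp
          exact_mod_cast hlen2
        have hbv : PySem.List.pyGetD full ((s : Int) + 1) [] = b := by
          have h0 := congrArg (fun l => l[0]?) hdrop'
          simp [List.getElem?_drop] at h0
          have hc : ((s : Int) + 1) = ((s + 1 : Nat) : Int) := by push_cast; ring
          rw [hc, PySem.List.pyGetD_natCast]
          simp [List.getD_eq_getElem?_getD, h0]
        have ih' := ih (s + 1) hdrop'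
        push_cast at ih'
        simp only [List.filter_cons, hb, if_true, List.map_cons, hpred, ha, hbv]
        rw [ih']
        simp [hb]

theorem pvPunctSet_eq : (PySem.Set.ofList pvPunct : List Char) = pvPunct := by decide

-- B's names list equals the zip form over the split words
theorem pvAltNames (sentence : String) :
    (sentence.toList.foldl
        (fun (s : List String × Option (List Char) × List Char) ch =>
          if (PySem.Set.ofList pvPunct : PySem.Set Char).contains ch then s
          else if ch = ' ' then (s.1 ++ pvEmit s.2.1 s.2.2, some s.2.2, ([] : List Char))
          else (s.1, s.2.1, s.2.2 ++ [ch]))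
        ([], none, [])).1
      ++ pvEmit
        (sentence.toList.foldl
          (fun (s : List String × Option (List Char) × List Char) ch =>
            if (PySem.Set.ofList pvPunct : PySem.Set Char).contains ch then s
            else if ch = ' ' then (s.1 ++ pvEmit s.2.1 s.2.2, some s.2.2, ([] : List Char))
            else (s.1, s.2.1, s.2.2 ++ [ch]))
          ([], none, [])).2.1
        (sentence.toList.foldl
          (fun (s : List String × Option (List Char) × List Char) ch =>
            if (PySem.Set.ofList pvPunct : PySem.Set Char).contains ch then s
            else if ch = ' ' then (s.1 ++ pvEmit s.2.1 s.2.2, some s.2.2, ([] : List Char))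
            else (s.1, s.2.1, s.2.2 ++ [ch]))
          ([], none, [])).2.2
    = List.map (fun q => pvName q.1 q.2)
        (List.filter (fun q => pvIsTitle q.1)
          ((PySem.Chars.splitOn (sentence.toList.filter (fun c => !(pvPunct.contains c))) " ".toList).zip
            ((PySem.Chars.splitOn (sentence.toList.filter (fun c => !(pvPunct.contains c))) " ".toList).drop 1))) := by
  have hfun : (fun (s : List String × Option (List Char) × List Char) ch =>
        if (PySem.Set.ofList pvPunct : PySem.Set Char).contains ch then s
        else if ch = ' ' then (s.1 ++ pvEmit s.2.1 s.2.2, some s.2.2, ([] : List Char))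
        else (s.1, s.2.1, s.2.2 ++ [ch]))
      = (fun (x : List String × Option (List Char) × List Char) (y : Char) =>
          if (!(pvPunct.contains y)) = true then pvStep x y else x) := by
    funext st c
    rw [show (PySem.Set.ofList pvPunct : PySem.Set Char) = (pvPunct : List Char) from pvPunctSet_eq]
    by_cases hm : c ∈ pvPunct <;> simp [hm, pvStep]
  rw [hfun, ← List.foldl_filter, pvFold_eq]
  rw [show (" ".toList) = [' '] from rfl, pvSplitOn_eq]
  obtain ⟨w, r, hw⟩ := List.exists_cons_of_ne_nil
    (pvMySplit_ne_nil (sentence.toList.filter (fun c => !(pvPunct.contains c))))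
  simp only [hw, pvConsHead, List.nil_append]
  rw [pvPairs_none]

theorem extractNER_eq (sentence : String) : extractNER sentence = extractNER_alt sentence := by
  unfold extractNER extractNER_alt
  dsimp only
  rw [PySem.List.foldl_append_if
        (fun i => decide (i + 1 < ((PySem.Chars.splitOn (sentence.toList.filter (fun c => !(pvPunct.contains c))) " ".toList).length : Int)))]
  rw [List.nil_append]
  have hk := pv_key (PySem.Chars.splitOn (sentence.toList.filter (fun c => !(pvPunct.contains c))) " ".toList)
      (PySem.Chars.splitOn (sentence.toList.filter (fun c => !(pvPunct.contains c))) " ".toList) 0 rfl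
  rw [Nat.cast_zero] at hk
  rw [hk]
  rw [pvAltNames sentence]

-- ===== VERDICT =====
theorem extractNER_spec : Claim_equal_extractNER := by
  intro sentence _
  unfold Spec_extractNER
  exact extractNER_eq sentence
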